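-- pv_equiv track=rewrite | github.com/adityagoel4512/EPI-Solutions | epi_judge_python/replace_and_remove.py | replace_and_remove
-- ===== SOURCE A (Python) =====
-- from typing import List
--
-- def replace_and_remove(size: int, s: List[str]) -> int:
--     def remove_char(c):
--         w = 0
--         final_len = 0
--         for i in range(size):
--             if s[i] != c:
--                 s[w] = s[i]
--                 w += 1
--                 final_len += 1 if s[i] != 'a' else 2
--         return w, final_len
--
--     w, new_len = remove_char('b')
--     def insert_char(prev):
--         r = prev-1
--         w = new_len-1
--         for i in range(r, -1, -1):
--             if s[i] == 'a':
--                 s[w] = 'd'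
--                 s[w-1] = 'd'
--                 w -= 2
--             else:
--                 s[w] = s[i]
--                 w -= 1
--
--     insert_char(w)
--     return new_len
-- ===== SOURCE B (Python) =====
-- from typing import List
--
-- def replace_and_remove(size: int, s: List[str]) -> int:
--     result = []
--     for i in range(size):
--         c = s[i]
--         if c == 'a':
--             result.append('d')
--             result.append('d')
--         elif c != 'b':
--             result.append(c)
--     for i, c in enumerate(result):
--         s[i] = c
--     return len(result)
-- ===== Notes on version B (the rewrite author's own statement) =====
-- stated objective: simpler
-- what changed: A compacts the array in place by a forward pass that deletes 'b' and then expands 'a' into 'dd' with a second, backward in-place pass over shifting write indices; B does one forward pass building a fresh buffer (append 'd','d' for 'a', skip 'b', keep others) and copies it back, returning the buffer length.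
import Mathlib
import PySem

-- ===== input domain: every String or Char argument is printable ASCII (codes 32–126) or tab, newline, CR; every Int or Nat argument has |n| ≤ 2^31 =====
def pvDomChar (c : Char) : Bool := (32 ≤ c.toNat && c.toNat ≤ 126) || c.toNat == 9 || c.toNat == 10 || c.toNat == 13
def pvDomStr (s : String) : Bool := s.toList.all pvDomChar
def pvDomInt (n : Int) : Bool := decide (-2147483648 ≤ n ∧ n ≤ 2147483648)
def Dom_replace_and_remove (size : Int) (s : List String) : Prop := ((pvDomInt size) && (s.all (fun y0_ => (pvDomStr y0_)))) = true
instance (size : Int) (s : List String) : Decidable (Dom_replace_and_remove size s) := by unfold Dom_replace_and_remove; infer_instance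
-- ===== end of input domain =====

-- B replaces A's two passes (compact-removing 'b', then a backward in-place expansion of 'a')
-- with one forward pass building a fresh buffer that is copied back; equivalence proved is about
-- the RETURN value only (both Pythons mutate s; on Pre_ they in fact leave the same array, unproved).

-- ===== PORT A =====
-- remove_char('b'): state = (s, w, final_len)
def rrRemoveStep (st : List String × Int × Int) (i : Int) : List String × Int × Int :=
  let si := PySem.List.pyGetD st.1 i ""
  if si ≠ "b" then
    (PySem.List.pySetD st.1 st.2.1 si, st.2.1 + 1, st.2.2 + (if si ≠ "a" then 1 else 2))
  else st

-- insert_char: state = (s, w); only mutates s, returns nothing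
def rrInsertStep (st : List String × Int) (i : Int) : List String × Int :=
  let si := PySem.List.pyGetD st.1 i ""
  if si = "a" then
    (PySem.List.pySetD (PySem.List.pySetD st.1 st.2 "d") (st.2 - 1) "d", st.2 - 2)
  else
    (PySem.List.pySetD st.1 st.2 si, st.2 - 1)

def replace_and_remove (size : Int) (s : List String) : Int :=
  let st := (PySem.List.pyRange 0 size).foldl rrRemoveStep (s, 0, 0)
  let w := st.2.1
  let new_len := st.2.2
  -- insert_char(w): mutates the array only; its result does not reach the return value
  let _s2 := (PySem.List.pyRange (w - 1) (-1) (-1)).foldl rrInsertStep (st.1, new_len - 1)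
  new_len

-- ===== PORT B =====
-- one forward pass: append "d","d" for 'a', skip 'b', keep anything else
def rrBuildStep (s : List String) (acc : List String) (i : Int) : List String :=
  let c := PySem.List.pyGetD s i ""
  if c = "a" then acc ++ ["d", "d"]
  else if c ≠ "b" then acc ++ [c]
  else acc

def replace_and_remove_alt (size : Int) (s : List String) : Int :=
  let result := (PySem.List.pyRange 0 size).foldl (rrBuildStep s) []
  -- copy-back loop: mutates the array only; the return value is len(result)
  let _s2 := (PySem.List.enumerate result 0).foldl
      (fun t p => PySem.List.pySetD t p.1 p.2) s
  (result.length : Int)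

-- ===== PRECONDITION & SPEC =====
-- Pre_ excludes exactly the inputs on which Python A raises IndexError: size beyond len(s),
-- or an expanded length (non-'b' count + 'a' count over s[:size]) exceeding len(s).
def Pre_replace_and_remove (size : Int) (s : List String) : Prop :=
  size ≤ (s.length : Int) ∧
  ((PySem.List.slice s (some 0) (some size)).count "a" : Int) ≤
    ((PySem.List.slice s (some 0) (some size)).count "b" : Int) + (s.length : Int) - size
instance (size : Int) (s : List String) : Decidable (Pre_replace_and_remove size s) := by
  unfold Pre_replace_and_remove; infer_instance
def pvWitness_replace_and_remove : Int × List String := (3, ["a", "b", "c"])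

def Spec_replace_and_remove (size : Int) (s : List String) (out : Int) : Prop := out = replace_and_remove_alt size s
instance (size : Int) (s : List String) (out : Int) : Decidable (Spec_replace_and_remove size s out) := by unfold Spec_replace_and_remove; infer_instance

-- ===== CLAIM (what is proved, stated in full; the proofs are below) =====
def Claim_equal_replace_and_remove : Prop := ∀ (size : Int) (s : List String), Dom_replace_and_remove size s → Pre_replace_and_remove size s → Spec_replace_and_remove size s (replace_and_remove size s)

-- ===== LEMMAS AND PROOFS =====

-- writing at an index strictly below j does not change the value read at j
lemma pyGetD_pySetD_lt (l : List String) (w : Int) (v : String) (j : Nat)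
    (h0 : 0 ≤ w) (h : w < (j : Int)) :
    PySem.List.pyGetD (PySem.List.pySetD l w v) (j : Int) "" =
      PySem.List.pyGetD l (j : Int) "" := by
  rw [PySem.List.pySetD_of_nonneg _ _ h0, PySem.List.pyGetD_natCast, PySem.List.pyGetD_natCast]
  have hne : w.toNat ≠ j := by omega
  simp [List.getD_eq_getElem?_getD, List.getElem?_set_ne hne]

-- loop invariant tying A's remove_char fold to B's buffer-building fold over the same prefix
lemma rr_invariant (s : List String) (n : Nat) :
    ((PySem.List.pyRange 0 (n : Int)).foldl rrRemoveStep (s, 0, 0)).1.length = s.length ∧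
    0 ≤ ((PySem.List.pyRange 0 (n : Int)).foldl rrRemoveStep (s, 0, 0)).2.1 ∧
    ((PySem.List.pyRange 0 (n : Int)).foldl rrRemoveStep (s, 0, 0)).2.1 ≤ (n : Int) ∧
    (∀ j : Nat, n ≤ j →
      PySem.List.pyGetD ((PySem.List.pyRange 0 (n : Int)).foldl rrRemoveStep (s, 0, 0)).1 (j : Int) ""
        = PySem.List.pyGetD s (j : Int) "") ∧
    ((PySem.List.pyRange 0 (n : Int)).foldl rrRemoveStep (s, 0, 0)).2.2 =
      (((PySem.List.pyRange 0 (n : Int)).foldl (rrBuildStep s) []).length : Int) := by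
  induction n with
  | zero => simp [PySem.List.pyRange]
  | succ n ih =>
    obtain ⟨hlen, hw0, hwn, hagree, hfl⟩ := ih
    have hsplit : PySem.List.pyRange 0 ((n + 1 : Nat) : Int) =
        PySem.List.pyRange 0 (n : Int) ++ [(n : Int)] := by
      push_cast
      exact PySem.List.pyRange_one_succ_right (by positivity)
    set st := (PySem.List.pyRange 0 (n : Int)).foldl rrRemoveStep (s, 0, 0) with hst
    set res := (PySem.List.pyRange 0 (n : Int)).foldl (rrBuildStep s) [] with hres
    have hA : (PySem.List.pyRange 0 ((n + 1 : Nat) : Int)).foldl rrRemoveStep (s, 0, 0) =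
        rrRemoveStep st (n : Int) := by rw [hsplit, List.foldl_append]; rfl
    have hB : (PySem.List.pyRange 0 ((n + 1 : Nat) : Int)).foldl (rrBuildStep s) [] =
        rrBuildStep s res (n : Int) := by rw [hsplit, List.foldl_append]; rfl
    have hread : PySem.List.pyGetD st.1 (n : Int) "" = PySem.List.pyGetD s (n : Int) "" :=
      hagree n le_rfl
    have hAe : rrRemoveStep st (n : Int) =
        (if PySem.List.pyGetD st.1 (n : Int) "" ≠ "b" then
          (PySem.List.pySetD st.1 st.2.1 (PySem.List.pyGetD st.1 (n : Int) ""), st.2.1 + 1,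
            st.2.2 + (if PySem.List.pyGetD st.1 (n : Int) "" ≠ "a" then 1 else 2))
        else st) := rfl
    rw [hread] at hAe
    have hBe : rrBuildStep s res (n : Int) =
        (if PySem.List.pyGetD s (n : Int) "" = "a" then res ++ ["d", "d"]
         else if PySem.List.pyGetD s (n : Int) "" ≠ "b" then res ++ [PySem.List.pyGetD s (n : Int) ""]
         else res) := rfl
    rw [hA, hB, hAe, hBe]
    by_cases hb : PySem.List.pyGetD s (n : Int) "" = "b"
    · -- 'b': both sides drop the element
      rw [if_neg (not_not_intro hb), if_neg (by rw [hb]; decide), if_neg (not_not_intro hb)]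
      exact ⟨hlen, hw0, by push_cast; omega, fun j hj => hagree j (by omega), hfl⟩
    · by_cases ha : PySem.List.pyGetD s (n : Int) "" = "a"
      · -- 'a': A keeps it weighted 2, B appends "d","d"
        rw [if_pos hb, if_neg (not_not_intro ha), if_pos ha]
        dsimp only
        refine ⟨?_, by omega, by push_cast; omega, ?_, ?_⟩
        · rw [PySem.List.length_pySetD]; exact hlen
        · intro j hj
          rw [pyGetD_pySetD_lt _ _ _ _ hw0 (by omega)]
          exact hagree j (by omega)
        · simp only [List.length_append, List.length_cons, List.length_nil, hfl]
          push_cast; omega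
      · -- ordinary element: both keep it with weight 1
        rw [if_pos hb, if_pos ha, if_neg ha, if_pos hb]
        dsimp only
        refine ⟨?_, by omega, by push_cast; omega, ?_, ?_⟩
        · rw [PySem.List.length_pySetD]; exact hlen
        · intro j hj
          rw [pyGetD_pySetD_lt _ _ _ _ hw0 (by omega)]
          exact hagree j (by omega)
        · simp only [List.length_append, List.length_cons, List.length_nil, hfl]
          push_cast; omega

-- the two ports return the same value on every input (Pre_ is only needed for the Python side)
lemma rr_ports_eq (size : Int) (s : List String) :
    replace_and_remove size s = replace_and_remove_alt size s := by
  have hrange : PySem.List.pyRange 0 size = PySem.List.pyRange 0 ((size.toNat : Nat) : Int) := by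
    rw [PySem.List.pyRange_one, PySem.List.pyRange_one,
      show (size - 0).toNat = (((size.toNat : Nat) : Int) - 0).toNat by omega]
  have h := (rr_invariant s size.toNat).2.2.2.2
  simp only [replace_and_remove, replace_and_remove_alt, hrange]
  exact h

-- ===== VERDICT (by name: the statement is the Claim_ definition above) =====
theorem replace_and_remove_spec : Claim_equal_replace_and_remove := by
  intro size s _ _
  unfold Spec_replace_and_remove
  exact rr_ports_eq size s
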